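-- pv_equiv track=rewrite | github.com/CCLab/RS_ref | rawsalad/databrowser/views.py | build_idef_regexp
-- ===== SOURCE A (Python) =====
-- def build_idef_regexp( curr_idef ):
--     """ build regexp quering collection """
--     level_num= curr_idef.count('-')
--
--     # build regexp for the given idef plus it's context (siblings and full parental branch)
--     if level_num > 0: # deeper than 'a'
--         idef_srch= curr_idef.rsplit('-', 1)[0]
--         lookup_idef= r'^%s\-([A-Z]|\d)+$' % idef_srch
--         curr_idef= idef_srch
--         level= 1
--         while level < level_num:
--             idef_srch= curr_idef.rsplit('-', 1)[0]
--             lookup_idef += r'|^%s\-([A-Z]|\d)+$' % idef_srch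
--             curr_idef= idef_srch
--             level += 1
--         lookup_idef += r'|^([A-Z]|\d)+$'
--
--     else: # simply query the highest level
--         lookup_idef= r'^([A-Z]|\d)+$'
--
--     return lookup_idef
-- ===== SOURCE B (Python) =====
-- def build_idef_regexp(curr_idef):
--     """ build regexp quering collection """
--     parts = curr_idef.split('-')
--     pats = [r'^([A-Z]|\d)+$']
--     pats += [r'^%s\-([A-Z]|\d)+$' % '-'.join(parts[:i]) for i in range(1, len(parts))]
--     return '|'.join(reversed(pats))
-- ===== Notes on version B (the rewrite author's own statement) =====
-- stated objective: simpler
-- what changed: B splits the idef once and builds each alternative from an indexed prefix join over range(1, len(parts)) (collected ascending, then reversed and joined), replacing A's stateful while loop that repeatedly rsplits the shrinking string and concatenates onto an accumulator.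
import Mathlib
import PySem

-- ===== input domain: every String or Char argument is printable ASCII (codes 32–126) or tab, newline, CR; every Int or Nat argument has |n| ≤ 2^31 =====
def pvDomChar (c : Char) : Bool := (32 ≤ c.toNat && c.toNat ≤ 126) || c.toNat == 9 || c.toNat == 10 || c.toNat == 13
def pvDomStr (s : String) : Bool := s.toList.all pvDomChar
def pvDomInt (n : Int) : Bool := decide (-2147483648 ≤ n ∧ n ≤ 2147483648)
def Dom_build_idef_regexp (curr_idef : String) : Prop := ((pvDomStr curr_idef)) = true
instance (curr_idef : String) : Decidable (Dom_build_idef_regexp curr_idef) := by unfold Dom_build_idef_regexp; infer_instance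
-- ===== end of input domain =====

-- B splits the idef once and joins indexed prefixes instead of A's while loop of repeated rsplits; same result, same cost (objective: simpler).


-- ===== PORT A =====
-- Python's s.rsplit('-', 1)[0]: the prefix before the LAST '-', or s itself if there is no '-' (exact hand port; PySem has no rsplit)
def pvRsplitHead (cs : List Char) : List Char :=
  match cs.reverse.dropWhile (fun c => c ≠ '-') with
  | [] => cs
  | _ :: rest => rest.reverse

-- r'^%s\-([A-Z]|\d)+$' % p
def pvPat (p : List Char) : List Char := '^' :: p ++ "\\-([A-Z]|\\d)+$".toList

-- r'^([A-Z]|\d)+$'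
def pvTop : List Char := "^([A-Z]|\\d)+$".toList

-- A's while loop; fuel = level_num - level (level goes 1, 2, …, level_num)
def pvALoop : Nat → List Char → List Char → List Char
  | 0, _, acc => acc
  | n + 1, curr, acc =>
      let p := pvRsplitHead curr
      pvALoop n p (acc ++ '|' :: pvPat p)

def build_idef_regexp (curr_idef : String) : String :=
  let cs := curr_idef.toList
  let level_num := PySem.Chars.count cs ['-']
  if 0 < level_num then
    let p := pvRsplitHead cs
    String.ofList (pvALoop (level_num - 1) p (pvPat p) ++ '|' :: pvTop)
  else
    String.ofList pvTop

-- ===== PORT B =====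
def build_idef_regexp_alt (curr_idef : String) : String :=
  let parts := PySem.Chars.splitOn curr_idef.toList ['-']
  let pats := pvTop :: (PySem.List.pyRange 1 (parts.length : Int)).map
      (fun i => pvPat (PySem.Chars.join ['-'] (PySem.List.slice parts none (some i))))
  String.ofList (PySem.Chars.join ['|'] pats.reverse)

-- ===== PRECONDITION & SPEC =====
def Spec_build_idef_regexp (curr_idef : String) (out : String) : Prop := out = build_idef_regexp_alt curr_idef
instance (curr_idef : String) (out : String) : Decidable (Spec_build_idef_regexp curr_idef out) := by unfold Spec_build_idef_regexp; infer_instance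

-- ===== CLAIM (what is proved, stated in full; the proofs are below) =====
def Claim_equal_build_idef_regexp : Prop := ∀ (curr_idef : String), Dom_build_idef_regexp curr_idef → Spec_build_idef_regexp curr_idef (build_idef_regexp curr_idef)

-- ===== LEMMAS AND PROOFS =====


theorem pvCountGo (c : Char) : ∀ (l : List Char) (fuel acc : Nat), l.length ≤ fuel →
    PySem.Chars.count.go [c] fuel l acc = acc + l.count c := by
  intro l
  induction l with
  | nil => intro fuel acc h; cases fuel <;> simp [PySem.Chars.count.go]
  | cons a t ih =>
    intro fuel acc h
    cases fuel with
    | zero => simp at h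
    | succ f =>
      have hf : t.length ≤ f := by simpa using h
      by_cases hc : c = a
      · subst hc
        simp [PySem.Chars.count.go, List.isPrefixOf, ih f (acc+1) hf]
        omega
      · simp [PySem.Chars.count.go, List.isPrefixOf, Ne.symm hc, hc, ih f acc hf]

theorem pvCountEq (cs : List Char) (c : Char) : PySem.Chars.count cs [c] = cs.count c := by
  simp [PySem.Chars.count, pvCountGo c cs cs.length 0 (le_refl _)]

def pvSp (c : Char) : List Char → List Char → List (List Char)
  | [], cur => [cur.reverse]
  | a :: t, cur => if a = c then cur.reverse :: pvSp c t [] else pvSp c t (a :: cur)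

theorem pvSplitGo (c : Char) : ∀ (l : List Char) (cur : List Char) (acc : List (List Char)) (fuel : Nat),
    l.length < fuel →
    PySem.Chars.splitOn.go [c] fuel l cur acc = acc.reverse ++ pvSp c l cur := by
  intro l
  induction l with
  | nil =>
    intro cur acc fuel h
    cases fuel with
    | zero => simp at h
    | succ f => simp [PySem.Chars.splitOn.go, pvSp]
  | cons a t ih =>
    intro cur acc fuel h
    cases fuel with
    | zero => simp at h
    | succ f =>
      have hf : t.length < f := by simpa using h
      by_cases hc : a = c
      · subst hc
        simp [PySem.Chars.splitOn.go, List.isPrefixOf, ih [] (cur.reverse :: acc) f hf, pvSp]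
      · simp [PySem.Chars.splitOn.go, List.isPrefixOf, Ne.symm hc, hc, ih (a :: cur) acc f hf, pvSp]

theorem pvSplitEq (cs : List Char) (c : Char) : PySem.Chars.splitOn cs [c] = pvSp c cs [] := by
  simp [PySem.Chars.splitOn, pvSplitGo c cs [] [] (cs.length + 1) (by omega)]

theorem pvJoinCons (c : Char) (a : List Char) (l : List (List Char)) (h : l ≠ []) :
    [c].intercalate (a :: l) = a ++ c :: [c].intercalate l := by
  cases l with
  | nil => simp at h
  | cons b t => simp [List.intercalate, List.intersperse]

theorem pvJoinSnoc (c : Char) (q : List Char) : ∀ (ps : List (List Char)), ps ≠ [] →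
    [c].intercalate (ps ++ [q]) = [c].intercalate ps ++ c :: q := by
  intro ps
  induction ps with
  | nil => intro h; simp at h
  | cons a t ih =>
    intro _
    cases t with
    | nil => simp [List.intercalate, List.intersperse]
    | cons b u =>
      rw [List.cons_append, pvJoinCons c a ((b :: u) ++ [q]) (by simp),
        pvJoinCons c a (b :: u) (by simp), ih (by simp)]
      simp

theorem pvSpNe (c : Char) : ∀ (l cur : List Char), pvSp c l cur ≠ [] := by
  intro l
  induction l with
  | nil => intro cur; simp [pvSp]
  | cons a t ih =>
    intro cur
    rw [pvSp]
    split
    · simp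
    · exact ih _

theorem pvSpJoin (c : Char) : ∀ (l cur : List Char), [c].intercalate (pvSp c l cur) = cur.reverse ++ l := by
  intro l
  induction l with
  | nil => intro cur; simp [pvSp, List.intercalate]
  | cons a t ih =>
    intro cur
    by_cases hc : a = c
    · subst hc
      rw [pvSp, if_pos rfl, pvJoinCons a _ _ (pvSpNe a t []), ih []]
      simp
    · rw [pvSp]
      simp only [if_neg hc]
      rw [ih (a :: cur)]
      simp

theorem pvSpFree (c : Char) : ∀ (l cur : List Char), c ∉ cur → ∀ p ∈ pvSp c l cur, c ∉ p := by
  intro l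
  induction l with
  | nil => intro cur hcur p hp; simp [pvSp] at hp; subst hp; simpa using hcur
  | cons a t ih =>
    intro cur hcur p hp
    by_cases hc : a = c
    · subst hc
      rw [pvSp] at hp
      simp only at hp
      rcases List.mem_cons.1 hp with h | h
      · subst h; simpa using hcur
      · exact ih [] (by simp) p h
    · rw [pvSp] at hp
      simp only [if_neg hc] at hp
      refine ih (a :: cur) ?_ p hp
      simp [hcur]
      exact fun h => hc h.symm

theorem pvSpLen (c : Char) : ∀ (l cur : List Char), (pvSp c l cur).length = l.count c + 1 := by
  intro l
  induction l with
  | nil => intro cur; simp [pvSp]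
  | cons a t ih =>
    intro cur
    rw [pvSp]
    by_cases hc : a = c
    · subst hc; simp [ih]
    · simp [hc, ih]

theorem pvRsplitHeadJoin (ps : List (List Char)) (q : List Char) (hps : ps ≠ []) (hq : '-' ∉ q) :
    pvRsplitHead (['-'].intercalate (ps ++ [q])) = ['-'].intercalate ps := by
  rw [pvJoinSnoc '-' q ps hps]
  unfold pvRsplitHead
  rw [List.reverse_append, List.reverse_cons, List.append_assoc, List.dropWhile_append]
  have h1 : (q.reverse.dropWhile fun c => c ≠ '-') = [] := by
    rw [List.dropWhile_eq_nil_iff]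
    intro x hx
    simp
    intro h; subst h
    exact hq (List.mem_reverse.1 hx)
  rw [h1]
  simp

def pvSeg : Nat → List (List Char) → List Char
  | 0, _ => []
  | k + 1, qs => '|' :: pvPat (['-'].intercalate qs.dropLast) ++ pvSeg k qs.dropLast

theorem pvLoopEq : ∀ (k : Nat) (qs : List (List Char)) (acc : List Char),
    k < qs.length → (∀ p ∈ qs, '-' ∉ p) →
    pvALoop k (['-'].intercalate qs) acc = acc ++ pvSeg k qs := by
  intro k
  induction k with
  | zero => intro qs acc _ _; simp [pvALoop, pvSeg]
  | succ k ih =>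
    intro qs acc hlen hfree
    have hne : qs ≠ [] := by intro h; subst h; simp at hlen
    have hd : qs.dropLast ++ [qs.getLast hne] = qs := List.dropLast_append_getLast hne
    have hlen' : qs.dropLast.length = qs.length - 1 := by simp
    have hdne : qs.dropLast ≠ [] := by
      intro h; rw [h] at hlen'; simp at hlen'; omega
    have hq : '-' ∉ qs.getLast hne := hfree _ (List.getLast_mem hne)
    simp only [pvALoop]
    rw [show (['-'].intercalate qs) = ['-'].intercalate (qs.dropLast ++ [qs.getLast hne]) by rw [hd]]
    rw [pvRsplitHeadJoin _ _ hdne hq]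
    rw [ih qs.dropLast _ (by omega) (fun p hp => hfree p (List.dropLast_subset qs hp))]
    rw [pvSeg]
    simp

theorem pvChainEq (P : List (List Char)) : ∀ (m : Nat), 1 ≤ m → m < P.length →
    pvPat (['-'].intercalate (P.take m)) ++ (pvSeg (m - 1) (P.take m) ++ '|' :: pvTop)
      = PySem.Chars.join ['|']
          ((pvTop :: (PySem.List.pyRange 1 ((m : Int) + 1)).map
            (fun i => pvPat (PySem.Chars.join ['-'] (PySem.List.slice P none (some i))))).reverse) := by
  intro m
  induction m with
  | zero => intro h; omega
  | succ m ih =>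
    intro _ hlt
    by_cases hm : m = 0
    · subst hm
      have h2 : ((1 : Nat) : Int) + 1 = (1 : Int) + 1 := by norm_num
      rw [h2, PySem.List.pyRange_one_singleton 1]
      have hs : PySem.List.slice P none (some (1 : Int)) = P.take 1 :=
        PySem.List.slice_to_natCast P 1
      simp only [List.map_cons, List.map_nil, List.reverse_cons, List.reverse_nil,
        List.nil_append, List.cons_append, PySem.Chars.join, hs]
      rw [pvJoinCons '|' _ [pvTop] (by simp)]
      simp [pvSeg, List.intercalate]
    · have hm1 : 1 ≤ m := Nat.one_le_iff_ne_zero.2 hm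
      obtain ⟨k, rfl⟩ : ∃ k, m = k + 1 := ⟨m - 1, by omega⟩
      have hlt' : k + 1 < P.length := by omega
      have hdt : (P.take (k + 1 + 1)).dropLast = P.take (k + 1) := by
        rw [List.dropLast_eq_take, List.take_take]
        congr 1
        have : (P.take (k + 1 + 1)).length = k + 1 + 1 := by
          rw [List.length_take]; omega
        omega
      have hrange : PySem.List.pyRange 1 (((k + 1 + 1 : Nat) : Int) + 1)
          = PySem.List.pyRange 1 (((k + 1 : Nat) : Int) + 1) ++ [(((k + 1 : Nat) : Int) + 1)] := by
        push_cast
        exact PySem.List.pyRange_one_succ_right (by omega)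
      have hslice : PySem.List.slice P none (some (((k + 1 : Nat) : Int) + 1)) = P.take (k + 1 + 1) := by
        have := PySem.List.slice_to_natCast P (k + 1 + 1)
        push_cast at this
        push_cast
        exact this
      push_cast
      push_cast at hrange hslice
      rw [hrange]
      simp only [List.map_append, List.map_cons, List.map_nil, List.reverse_cons,
        List.reverse_append, List.reverse_nil, List.nil_append, List.cons_append]
      rw [pvSeg, hdt, hslice]
      rw [PySem.Chars.join, pvJoinCons '|' _ _ (by simp)]
      have hih := ih hm1 hlt'
      push_cast at hih
      simp only [List.reverse_cons, PySem.Chars.join] at hih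
      simp only [PySem.Chars.join]
      rw [← hih]
      simp

theorem pvMain (cs : List Char) :
      (if 0 < PySem.Chars.count cs ['-'] then
        String.ofList (pvALoop (PySem.Chars.count cs ['-'] - 1) (pvRsplitHead cs) (pvPat (pvRsplitHead cs)) ++ '|' :: pvTop)
      else String.ofList pvTop)
    = build_idef_regexp_alt (String.ofList cs) := by
  have hsplit : PySem.Chars.splitOn cs ['-'] = pvSp '-' cs [] := pvSplitEq cs '-'
  have hcount : PySem.Chars.count cs ['-'] = cs.count '-' := pvCountEq cs '-'
  have hlen : (pvSp '-' cs []).length = cs.count '-' + 1 := pvSpLen '-' cs []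
  have hJ : ['-'].intercalate (pvSp '-' cs []) = cs := by simpa using pvSpJoin '-' cs []
  have hfree : ∀ p ∈ pvSp '-' cs [], '-' ∉ p := pvSpFree '-' cs [] (by simp)
  unfold build_idef_regexp_alt
  simp only [String.toList_ofList, hsplit, hcount, hlen]
  by_cases h : 0 < cs.count '-'
  · rw [if_pos h]
    set P := pvSp '-' cs [] with hP
    set n := cs.count '-' with hn
    have hPlen : P.length = n + 1 := hlen
    have hPne : P ≠ [] := by intro hh; rw [hh] at hPlen; simp at hPlen
    have hdne : P.dropLast ≠ [] := by
      intro hh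
      have : P.dropLast.length = P.length - 1 := by simp
      rw [hh] at this; simp at this; omega
    have hqfree : '-' ∉ P.getLast hPne := hfree _ (List.getLast_mem hPne)
    have hrs : pvRsplitHead cs = ['-'].intercalate P.dropLast := by
      conv_lhs => rw [← hJ, ← List.dropLast_append_getLast hPne]
      exact pvRsplitHeadJoin _ _ hdne hqfree
    have hdt : P.dropLast = P.take n := by
      rw [List.dropLast_eq_take, hPlen]; simp
    have htlen : (P.take n).length = n := by rw [List.length_take]; omega
    have hloop := pvLoopEq (n - 1) (P.take n) (pvPat (['-'].intercalate (P.take n)))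
      (by omega) (fun p hp => hfree p (List.take_subset n P hp))
    rw [hrs, hdt, hloop]
    have hchain := pvChainEq P n h (by omega)
    rw [List.append_assoc]
    rw [hchain]
    norm_cast
  · rw [if_neg h]
    have hn0 : cs.count '-' = 0 := by omega
    rw [hn0]
    have : PySem.List.pyRange 1 ((0 + 1 : Nat) : Int) = [] := by
      rw [PySem.List.pyRange_one]
      simp
    rw [this]
    simp [PySem.Chars.join, List.intercalate]

-- ===== VERDICT (by name: the statement is the Claim_ definition above) =====
theorem build_idef_regexp_spec : Claim_equal_build_idef_regexp := by
  intro s _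
  unfold Spec_build_idef_regexp build_idef_regexp
  have := pvMain s.toList
  rw [String.ofList_toList] at this
  exact this
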